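-- pv_equiv track=rewrite | github.com/MaxMCannon/Advent2024 | helpers.py | swapListElements
-- ===== SOURCE A (Python) =====
-- def swapListElements(l, e1, e2):
--     outlist = []
--     i1 = 0
--     i2 = 0
--     for i in range(len(l)):
--         if l[i] == e1:
--             i1 = i
--         if l[i] == e2:
--             i2 = i
--     l[i1], l[i2] = l[i2], l[i1]
--     return l
-- ===== SOURCE B (Python) =====
-- def swapListElements(l, e1, e2):
--     i1 = 0
--     for i in range(len(l) - 1, -1, -1):
--         if l[i] == e1:
--             i1 = i
--             break
--     i2 = 0
--     for i in range(len(l) - 1, -1, -1):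
--         if l[i] == e2:
--             i2 = i
--             break
--     tmp = l[i1]
--     l[i1] = l[i2]
--     l[i2] = tmp
--     return l
-- ===== Notes on version B (the rewrite author's own statement) =====
-- stated objective: alternative
-- what changed: A's single forward pass that keeps updating two running last-seen indices is replaced by two independent reverse scans that each early-break on the first match from the end (defaulting to 0), then the same in-place swap.
-- outside the precondition, e.g. on swapListElements([], 0, 0): A raises IndexError, B raises IndexError
import Mathlib
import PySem

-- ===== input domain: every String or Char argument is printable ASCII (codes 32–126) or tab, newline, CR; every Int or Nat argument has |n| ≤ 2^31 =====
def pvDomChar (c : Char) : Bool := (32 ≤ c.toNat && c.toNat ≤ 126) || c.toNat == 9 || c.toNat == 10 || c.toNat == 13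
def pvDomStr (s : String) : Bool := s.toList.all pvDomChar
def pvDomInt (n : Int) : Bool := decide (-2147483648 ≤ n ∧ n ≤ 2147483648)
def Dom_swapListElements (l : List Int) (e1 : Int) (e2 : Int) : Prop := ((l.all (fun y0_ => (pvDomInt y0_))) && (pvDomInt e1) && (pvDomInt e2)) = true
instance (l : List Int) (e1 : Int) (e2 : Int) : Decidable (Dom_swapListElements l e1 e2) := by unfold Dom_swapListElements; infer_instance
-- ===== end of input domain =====

-- B replaces A's single forward pass (two running last-seen indices) by two reverse early-break
-- scans, one per element, defaulting to 0; same in-place swap (both A and B mutate l; the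
-- equivalence proved here is about the returned list, which is the mutated l in both).


-- ===== PORT A =====
def swapListElements (l : List Int) (e1 : Int) (e2 : Int) : List Int :=
  let s := (PySem.List.pyRange 0 (l.length : Int) 1).foldl
    (fun (s : Int × Int) i =>
      let s := if PySem.List.pyGetD l i 0 = e1 then (i, s.2) else s
      if PySem.List.pyGetD l i 0 = e2 then (s.1, i) else s)
    (0, 0)
  -- l[i1], l[i2] = l[i2], l[i1] : read both, assign l[i1] first, then l[i2]
  let t := (PySem.List.pyGetD l s.2 0, PySem.List.pyGetD l s.1 0)
  PySem.List.pySetD (PySem.List.pySetD l s.1 t.1) s.2 t.2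

-- ===== PORT B =====
-- early-break reverse loop: first index i in idxs with l[i] == e, else 0
def revFirstIdx (l : List Int) (e : Int) : List Int → Int
  | [] => 0
  | i :: rest => if PySem.List.pyGetD l i 0 = e then i else revFirstIdx l e rest

def swapListElements_alt (l : List Int) (e1 : Int) (e2 : Int) : List Int :=
  let idxs := PySem.List.pyRange ((l.length : Int) - 1) (-1) (-1)
  let i1 := revFirstIdx l e1 idxs
  let i2 := revFirstIdx l e2 idxs
  -- tmp = l[i1]; l[i1] = l[i2]; l[i2] = tmp
  let tmp := PySem.List.pyGetD l i1 0
  let l' := PySem.List.pySetD l i1 (PySem.List.pyGetD l i2 0)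
  PySem.List.pySetD l' i2 tmp

-- ===== PRECONDITION & SPEC =====
-- Pre_ excludes only the empty list, on which both A and B raise IndexError at l[0].
def Pre_swapListElements (l : List Int) (e1 : Int) (e2 : Int) : Prop := l ≠ []
instance (l : List Int) (e1 : Int) (e2 : Int) : Decidable (Pre_swapListElements l e1 e2) := by unfold Pre_swapListElements; infer_instance
def pvWitness_swapListElements : List Int × Int × Int := ([1, 2, 3, 2], 2, 5)

def Spec_swapListElements (l : List Int) (e1 : Int) (e2 : Int) (out : List Int) : Prop := out = swapListElements_alt l e1 e2
instance (l : List Int) (e1 : Int) (e2 : Int) (out : List Int) : Decidable (Spec_swapListElements l e1 e2 out) := by unfold Spec_swapListElements; infer_instance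

-- ===== CLAIM (what is proved, stated in full; the proofs are below) =====
def Claim_equal_swapListElements : Prop := ∀ (l : List Int) (e1 : Int) (e2 : Int), Dom_swapListElements l e1 e2 → Pre_swapListElements l e1 e2 → Spec_swapListElements l e1 e2 (swapListElements l e1 e2)

-- ===== LEMMAS AND PROOFS =====

-- A's paired fold splits into two independent last-index folds
theorem foldPair (e1 e2 : Int) (f : Int → Int) :
    ∀ (r : List Int) (a b : Int),
      r.foldl (fun (s : Int × Int) i =>
          let s := if f i = e1 then (i, s.2) else s
          if f i = e2 then (s.1, i) else s) (a, b)
      = (r.foldl (fun a i => if f i = e1 then i else a) a,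
         r.foldl (fun b i => if f i = e2 then i else b) b) := by
  intro r
  induction r with
  | nil => intro a b; rfl
  | cons x xs ih =>
      intro a b
      simp only [List.foldl_cons]
      split_ifs <;> simp [ih]

-- the last-index fold of A, for one element
def lastFold (l : List Int) (e : Int) : Int :=
  (PySem.List.pyRange 0 (l.length : Int) 1).foldl
    (fun a i => if PySem.List.pyGetD l i 0 = e then i else a) 0

-- the reverse early-break scan of B, for one element
def lastScan (l : List Int) (e : Int) : Int :=
  revFirstIdx l e (PySem.List.pyRange ((l.length : Int) - 1) (-1) (-1))

theorem pyGetD_append_lt (l : List Int) (x : Int) (i : Int) (h0 : 0 ≤ i)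
    (h : i < (l.length : Int)) :
    PySem.List.pyGetD (l ++ [x]) i 0 = PySem.List.pyGetD l i 0 := by
  obtain ⟨k, rfl⟩ := Int.eq_ofNat_of_zero_le h0
  have hk : k < l.length := by exact_mod_cast h
  simp [PySem.List.pyGetD_natCast, List.getD, List.getElem?_append_left hk]

theorem pyGetD_append_self (l : List Int) (x : Int) :
    PySem.List.pyGetD (l ++ [x]) (l.length : Int) 0 = x := by
  simp [PySem.List.pyGetD_natCast, List.getD]

theorem revFirstIdx_congr (l l' : List Int) (e : Int) :
    ∀ idxs : List Int, (∀ i ∈ idxs, PySem.List.pyGetD l i 0 = PySem.List.pyGetD l' i 0) →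
      revFirstIdx l e idxs = revFirstIdx l' e idxs := by
  intro idxs
  induction idxs with
  | nil => intro _; rfl
  | cons i rest ih =>
      intro h
      simp only [revFirstIdx, h i (by simp)]
      split_ifs with hc
      · rfl
      · exact ih (fun j hj => h j (by simp [hj]))

theorem lastFold_append (l : List Int) (x e : Int) :
    lastFold (l ++ [x]) e = if x = e then (l.length : Int) else lastFold l e := by
  unfold lastFold
  have hlen : (((l ++ [x]).length : Int)) = (l.length : Int) + 1 := by simp
  rw [hlen, PySem.List.pyRange_one_succ_right (by positivity), List.foldl_append]
  simp only [List.foldl_cons, List.foldl_nil, pyGetD_append_self]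
  split_ifs with hx
  · rfl
  · apply PySem.List.foldl_congr_mem
    intro acc i hi
    rw [PySem.List.mem_pyRange_one] at hi
    rw [pyGetD_append_lt l x i hi.1 hi.2]

theorem lastScan_append (l : List Int) (x e : Int) :
    lastScan (l ++ [x]) e = if x = e then (l.length : Int) else lastScan l e := by
  unfold lastScan
  have hlen : (((l ++ [x]).length : Int)) - 1 = (l.length : Int) := by simp
  rw [hlen, PySem.List.pyRange_neg_one_cons (by omega)]
  simp only [revFirstIdx, pyGetD_append_self]
  split_ifs with hc
  · rfl
  · exact revFirstIdx_congr _ _ _ _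
      (by
        intro i hi
        rw [PySem.List.mem_pyRange_neg_one] at hi
        exact pyGetD_append_lt l x i (by omega) (by omega))

theorem lastFold_eq_lastScan (l : List Int) (e : Int) : lastFold l e = lastScan l e := by
  induction l using List.reverseRecOn with
  | nil => rfl
  | append_singleton xs x ih => rw [lastFold_append, lastScan_append, ih]

-- ===== VERDICT (by name: the statement is the Claim_ definition above) =====
theorem swapListElements_spec : Claim_equal_swapListElements := by
  intro l e1 e2 _ _
  unfold Spec_swapListElements swapListElements swapListElements_alt
  rw [foldPair]
  have h1 := lastFold_eq_lastScan l e1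
  have h2 := lastFold_eq_lastScan l e2
  unfold lastFold lastScan at h1 h2
  rw [h1, h2]
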